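-- pv_equiv track=rewrite | github.com/Radhikagindam/dsa-series | graph.py | create_adjacency_list
-- ===== SOURCE A (Python) =====
-- def create_adjacency_list(v, edges):
--     adjlist = []
--
--     # Initialize empty lists for each vertex
--     for i in range(v):
--         adjlist.append([])
--
--     # Fill adjacency list
--     for n, m in edges:
--         adjlist[n].append(m)
--         adjlist[m].append(n)  # because it's an undirected graph
--
--     # Sort each adjacency list
--     for adj in adjlist:
--         adj.sort()
--
--     return adjlist
-- ===== SOURCE B (Python) =====
-- def _insort(lst, x):
--     # insert x into the already-sorted list lst, keeping it sorted
--     i = 0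
--     while i < len(lst) and lst[i] <= x:
--         i += 1
--     lst.insert(i, x)
--
--
-- def create_adjacency_list(v, edges):
--     adjlist = [[] for _ in range(v)]
--     for n, m in edges:
--         _insort(adjlist[n], m)
--         _insort(adjlist[m], n)
--     return adjlist
-- ===== Notes on version B (the rewrite author's own statement) =====
-- stated objective: alternative
-- what changed: B keeps every adjacency list sorted as it goes, inserting each endpoint at its sorted position during the single distribution pass, instead of A's append-everything-then-sort-each-list three-pass scheme; the final per-vertex sort pass disappears.
import Mathlib
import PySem

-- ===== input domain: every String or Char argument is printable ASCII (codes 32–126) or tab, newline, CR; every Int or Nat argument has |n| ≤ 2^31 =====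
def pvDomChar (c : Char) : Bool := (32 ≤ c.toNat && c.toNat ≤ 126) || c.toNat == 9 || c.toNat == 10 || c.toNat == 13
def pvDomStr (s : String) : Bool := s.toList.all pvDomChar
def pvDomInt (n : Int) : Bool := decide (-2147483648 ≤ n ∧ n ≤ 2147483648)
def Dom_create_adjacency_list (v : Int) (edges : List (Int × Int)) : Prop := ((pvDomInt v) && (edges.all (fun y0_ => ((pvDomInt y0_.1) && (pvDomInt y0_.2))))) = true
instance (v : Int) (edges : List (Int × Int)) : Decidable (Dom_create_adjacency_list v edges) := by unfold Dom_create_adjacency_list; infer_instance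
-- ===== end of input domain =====

-- B replaces A's three passes (init, append both directions, sort each list) by a single
-- distribution pass that keeps every adjacency list sorted via insertion at the sorted
-- position (objective: alternative decomposition, no final per-vertex sort pass).


-- ===== PORT A =====
-- literal port of A: init v empty lists, append m to adjlist[n] and n to adjlist[m]
-- (pySetD/pyGetD are Python indexing incl. negative wraparound; out-of-range = IndexError
-- in Python, excluded by Pre_ below, the total forms leave the list unchanged there),
-- then sort each list (adj.sort()).
def create_adjacency_list (v : Int) (edges : List (Int × Int)) : List (List Int) :=
  let adjlist := (PySem.List.pyRange 0 v 1).foldl (fun acc _ => acc ++ [([] : List Int)]) []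
  let adjlist := edges.foldl (fun acc p =>
    let acc := PySem.List.pySetD acc p.1 (PySem.List.pyGetD acc p.1 [] ++ [p.2])
    PySem.List.pySetD acc p.2 (PySem.List.pyGetD acc p.2 [] ++ [p.1])) adjlist
  adjlist.map (fun adj => PySem.List.sorted adj (fun x => x) false)

-- ===== PORT B =====
-- _insort from Source B: scan to the first element > x, insert x there (list stays sorted)
def insortLin (xs : List Int) (x : Int) : List Int :=
  match xs with
  | [] => [x]
  | a :: t => if a ≤ x then a :: insortLin t x else x :: a :: t

def create_adjacency_list_alt (v : Int) (edges : List (Int × Int)) : List (List Int) :=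
  let adjlist := (PySem.List.pyRange 0 v 1).map (fun _ => ([] : List Int))
  edges.foldl (fun acc p =>
    let acc := PySem.List.pySetD acc p.1 (insortLin (PySem.List.pyGetD acc p.1 []) p.2)
    PySem.List.pySetD acc p.2 (insortLin (PySem.List.pyGetD acc p.2 []) p.1)) adjlist

-- ===== PRECONDITION & SPEC =====
-- Pre_ excludes exactly the inputs where Python A raises IndexError: an edge endpoint
-- that is not a valid (possibly negative) Python index into the v-element list.
def Pre_create_adjacency_list (v : Int) (edges : List (Int × Int)) : Prop :=
  ∀ p ∈ edges, PySem.Raise.InRange v.toNat p.1 ∧ PySem.Raise.InRange v.toNat p.2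
instance (v : Int) (edges : List (Int × Int)) : Decidable (Pre_create_adjacency_list v edges) := by unfold Pre_create_adjacency_list; infer_instance

def pvWitness_create_adjacency_list : Int × (List (Int × Int)) := (4, [(0, 1), (1, 2), (2, 0), (3, 1)])

def Spec_create_adjacency_list (v : Int) (edges : List (Int × Int)) (out : List (List Int)) : Prop := out = create_adjacency_list_alt v edges
instance (v : Int) (edges : List (Int × Int)) (out : List (List Int)) : Decidable (Spec_create_adjacency_list v edges out) := by unfold Spec_create_adjacency_list; infer_instance

-- ===== CLAIM (what is proved, stated in full; the proofs are below) =====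
def Claim_equal_create_adjacency_list : Prop := ∀ (v : Int) (edges : List (Int × Int)), Dom_create_adjacency_list v edges → Pre_create_adjacency_list v edges → Spec_create_adjacency_list v edges (create_adjacency_list v edges)

-- ===== LEMMAS AND PROOFS =====

-- abbreviation used only in the proofs: Python's list.sort() on ints
def pvS (l : List Int) : List Int := PySem.List.sorted l (fun x => x) false

theorem insortLin_perm (l : List Int) (x : Int) : (insortLin l x).Perm (x :: l) := by
  induction l with
  | nil => simp [insortLin]
  | cons a t ih =>
    simp only [insortLin]
    split
    · exact (ih.cons a).trans (List.Perm.swap x a t)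
    · exact List.Perm.refl _

theorem insortLin_pairwise (l : List Int) (x : Int) (h : l.Pairwise (· ≤ ·)) :
    (insortLin l x).Pairwise (· ≤ ·) := by
  induction l with
  | nil => simp [insortLin]
  | cons a t ih =>
    rcases List.pairwise_cons.mp h with ⟨ha, ht⟩
    simp only [insortLin]
    split
    · rename_i hax
      refine List.pairwise_cons.mpr ⟨?_, ih ht⟩
      intro y hy
      rcases List.mem_cons.mp ((insortLin_perm t x).mem_iff.mp hy) with hy | hy
      · omega
      · exact ha y hy
    · rename_i hax
      refine List.pairwise_cons.mpr ⟨?_, h⟩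
      intro y hy
      rcases List.mem_cons.mp hy with hy | hy
      · omega
      · exact le_trans (by omega) (ha y hy)

theorem insortLin_sorted (l : List Int) (x : Int) : insortLin (pvS l) x = pvS (l ++ [x]) := by
  unfold pvS
  refine (PySem.List.sorted_id_eq_of_perm_of_pairwise _ _ ?_ ?_).symm
  · have h1 := insortLin_perm (PySem.List.sorted l (fun x => x) false) x
    have h2 := (PySem.List.sorted_perm l (fun x : Int => x) false).cons x
    have h3 : (x :: l).Perm (l ++ [x]) := by
      simpa using (List.perm_append_comm (l₁ := [x]) (l₂ := l))
    exact (h1.trans h2).trans h3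
  · exact insortLin_pairwise _ x (PySem.List.sorted_pairwise l (fun x => x))

-- the B-step on the sorted image equals the sorted image of the A-step, for any index
theorem step_map (acc : List (List Int)) (i : Int) (x : Int) :
    PySem.List.pySetD (acc.map pvS) i (insortLin (PySem.List.pyGetD (acc.map pvS) i []) x)
      = (PySem.List.pySetD acc i (PySem.List.pyGetD acc i [] ++ [x])).map pvS := by
  have hget : PySem.List.pyGetD (acc.map pvS) i [] = pvS (PySem.List.pyGetD acc i []) := by
    have := PySem.List.pyGetD_map pvS acc i []
    simpa [pvS] using this
  rw [hget, insortLin_sorted]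
  simp only [PySem.List.pySetD, PySem.List.pySet?, List.length_map]
  cases PySem.List.pyIdx? acc.length i with
  | none => simp
  | some k => simp [List.map_set]

theorem fold_map (edges : List (Int × Int)) (acc : List (List Int)) :
    edges.foldl (fun acc p =>
        let acc := PySem.List.pySetD acc p.1 (insortLin (PySem.List.pyGetD acc p.1 []) p.2)
        PySem.List.pySetD acc p.2 (insortLin (PySem.List.pyGetD acc p.2 []) p.1)) (acc.map pvS)
      = (edges.foldl (fun acc p =>
        let acc := PySem.List.pySetD acc p.1 (PySem.List.pyGetD acc p.1 [] ++ [p.2])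
        PySem.List.pySetD acc p.2 (PySem.List.pyGetD acc p.2 [] ++ [p.1])) acc).map pvS := by
  induction edges generalizing acc with
  | nil => rfl
  | cons e es ih =>
    simp only [List.foldl_cons]
    rw [step_map, step_map, ih]

theorem init_fold (r : List Int) (acc : List (List Int)) :
    r.foldl (fun acc _ => acc ++ [([] : List Int)]) acc = acc ++ r.map (fun _ => []) := by
  induction r generalizing acc with
  | nil => simp
  | cons a t ih => simp [ih]

-- ===== VERDICT (by name: the statement is the Claim_ definition above) =====
theorem create_adjacency_list_spec : Claim_equal_create_adjacency_list := by
  intro v edges _ _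
  show create_adjacency_list v edges = create_adjacency_list_alt v edges
  have hinit : ((PySem.List.pyRange 0 v 1).map (fun _ => ([] : List Int))).map pvS
      = (PySem.List.pyRange 0 v 1).map (fun _ => ([] : List Int)) := by
    simp [pvS, PySem.List.sorted]
  unfold create_adjacency_list create_adjacency_list_alt
  simp only [init_fold, List.nil_append]
  have h := fold_map edges ((PySem.List.pyRange 0 v 1).map (fun _ => ([] : List Int)))
  rw [hinit] at h
  exact h.symm
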